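-- pv_equiv track=rewrite | github.com/nogicoder/the-shell | path_expansions.py | has_bad_substitution
-- ===== SOURCE A (Python) =====
-- def find_bracket(var):
--     try:
--         i = var.index('${')
--         j = var.index('}')
--         while j < i:
--             try:
--                 j = var[j+1:].index('}') + (j + 1)
--                 if i < j:
--                     break
--             except ValueError:
--                 break
--         return i, j
--     except Exception:
--         pass
--
-- def has_bad_substitution(var):
--     # if bracket has irregular character inside then True
--     try:
--         i, j = find_bracket(var)
--         bracket = var[i:j+1]
--         item = ['.', '#', '!', '%', '*', '@', '&', '(', ')']
--         if any(x in bracket for x in item):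
--             return True
--         # if bracket is empty then True
--         elif j == i + 2:
--             return True
--         else:
--             return False
--     except Exception:
--         return False
-- ===== SOURCE B (Python) =====
-- def has_bad_substitution(var):
--     # Single left-to-right pass with a tiny state machine: before '${' we only
--     # track whether the previous char was '$'; after '${' we accumulate whether
--     # a bad char was seen and whether the bracket body is empty, deciding at the
--     # first '}'.  No find/index passes, no slicing.
--     bad_chars = '.#!%*@&()'
--     inside = False
--     bad = False
--     empty = True
--     prev_dollar = False
--     for c in var:
--         if inside:
--             if c == '}':
--                 return bad or empty
--             if c in bad_chars:
--                 bad = True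
--             empty = False
--         elif prev_dollar and c == '{':
--             inside = True
--         else:
--             prev_dollar = (c == '$')
--     return False
-- ===== Notes on version B (the rewrite author's own statement) =====
-- stated objective: alternative
-- what changed: B replaces A's staged searches (index('${'), index('}'), an exception-driven re-slicing loop to pass i, then a slice plus a 9-way membership scan over the bracket) by a single left-to-right character pass with a small state machine that tracks prev-char-is-'$', inside-bracket, bad-char-seen and body-empty flags and decides at the first closing '}'.
import Mathlib
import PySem

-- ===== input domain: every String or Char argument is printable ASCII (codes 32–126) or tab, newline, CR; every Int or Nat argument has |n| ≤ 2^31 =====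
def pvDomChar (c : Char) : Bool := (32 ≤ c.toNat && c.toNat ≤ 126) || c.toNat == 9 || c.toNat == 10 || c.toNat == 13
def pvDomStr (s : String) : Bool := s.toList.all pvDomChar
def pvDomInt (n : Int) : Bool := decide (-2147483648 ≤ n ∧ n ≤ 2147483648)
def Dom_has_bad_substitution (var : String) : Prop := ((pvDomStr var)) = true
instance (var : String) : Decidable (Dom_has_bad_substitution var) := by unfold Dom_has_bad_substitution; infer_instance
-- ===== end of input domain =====

-- B replaces A's staged index/re-slice searches by one left-to-right pass with a
-- small state machine; objective: alternative decomposition (no speed claim).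

-- ===== PORT A =====
-- find is ≥ 0 whenever it is not -1 (cited by the loop's termination proof below)
theorem pv_find_nonneg (s sub : List Char) (h : PySem.Chars.find s sub ≠ -1) :
    (0:Int) ≤ PySem.Chars.find s sub := by
  have h0 := PySem.Chars.findFrom_zero s sub
  have hs := PySem.Chars.findFrom_natCast_spec s sub 0 (by omega)
    (by rw [Nat.cast_zero, h0]; exact h)
  rw [Nat.cast_zero, h0] at hs
  simpa using hs.1

def find_bracket_loop (var : String) (i j : Int) : Int :=
  if hji : j < i then
    let k := PySem.Str.find (PySem.Str.slice var (some (j + 1)) none) "}"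
    if hk : k = -1 then j
    else
      if i < k + (j + 1) then k + (j + 1)
      else find_bracket_loop var i (k + (j + 1))
  else j
termination_by (i - j).toNat
decreasing_by
  have := pv_find_nonneg ((PySem.Str.slice var (some (j + 1)) none)).toList "}".toList
    (by rw [← PySem.Str.find_eq]; exact hk)
  rw [← PySem.Str.find_eq] at this
  omega

-- var.index raising ValueError is modelled by find = -1 (the 'except: pass' → None path)
def find_bracket (var : String) : Option (Int × Int) :=
  let i := PySem.Str.find var "${"
  if i = -1 then none
  else
    let j := PySem.Str.find var "}"
    if j = -1 then none
    else some (i, find_bracket_loop var i j)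

def has_bad_substitution (var : String) : Bool :=
  match find_bracket var with
  | none => false   -- unpacking None raises TypeError → 'except Exception: return False'
  | some (i, j) =>
    let bracket := PySem.Str.slice var (some i) (some (j + 1))
    if ([".", "#", "!", "%", "*", "@", "&", "(", ")"] : List String).any
        (fun x => PySem.Str.isIn x bracket) then true
    else if j = i + 2 then true
    else false

-- ===== PORT B =====
def pvBadChars : List Char := ".#!%*@&()".toList

-- the for-loop of Source B: state (inside, bad, empty, prev_dollar), early return at the
-- first '}' seen while inside; falling off the end returns False
def hbs_loop : List Char → Bool → Bool → Bool → Bool → Bool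
  | [], _, _, _, _ => false
  | c :: rest, inside, bad, empty, prevD =>
    if inside then
      if c = '}' then bad || empty
      else hbs_loop rest inside (if pvBadChars.contains c then true else bad) false prevD
    else if prevD && (c == '{') then hbs_loop rest true bad empty prevD
    else hbs_loop rest inside bad empty (c == '$')

def has_bad_substitution_alt (var : String) : Bool :=
  hbs_loop var.toList false false true false

-- ===== PRECONDITION & SPEC =====
def Spec_has_bad_substitution (var : String) (out : Bool) : Prop := out = has_bad_substitution_alt var
instance (var : String) (out : Bool) : Decidable (Spec_has_bad_substitution var out) := by unfold Spec_has_bad_substitution; infer_instance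

-- ===== CLAIM (what is proved, stated in full; the proofs are below) =====
def Claim_equal_has_bad_substitution : Prop := ∀ (var : String), Dom_has_bad_substitution var → Spec_has_bad_substitution var (has_bad_substitution var)

-- ===== LEMMAS AND PROOFS =====

-- characterisation: find = k when sub is a prefix at position k and nowhere earlier
theorem pv_find_eq (s sub : List Char) (k : Nat) (h1 : sub <+: s.drop k)
    (h2 : ∀ m, m < k → ¬ sub <+: s.drop m) : PySem.Chars.find s sub = (k : Int) := by
  have hne : PySem.Chars.find s sub ≠ -1 := by
    rw [Ne, PySem.Chars.find_eq_neg_one_iff]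
    exact fun h => h (h1.isInfix.trans (List.drop_suffix k s).isInfix)
  have h0 := PySem.Chars.findFrom_zero s sub
  have hs := PySem.Chars.findFrom_natCast_spec s sub 0 (by omega)
    (by rw [Nat.cast_zero, h0]; exact hne)
  rw [Nat.cast_zero, h0] at hs
  obtain ⟨hnn, hpre, hmin⟩ := hs
  rcases lt_trichotomy (PySem.Chars.find s sub).toNat k with h | h | h
  · exact absurd hpre (h2 _ h)
  · omega
  · exact absurd h1 (hmin k (by omega) h)

theorem pv_find_spec (s sub : List Char) (h : PySem.Chars.find s sub ≠ -1) :
    0 ≤ PySem.Chars.find s sub ∧ sub <+: s.drop (PySem.Chars.find s sub).toNat ∧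
      ∀ m, m < (PySem.Chars.find s sub).toNat → ¬ sub <+: s.drop m := by
  have h0 := PySem.Chars.findFrom_zero s sub
  have hs := PySem.Chars.findFrom_natCast_spec s sub 0 (by omega)
    (by rw [Nat.cast_zero, h0]; exact h)
  rw [Nat.cast_zero, h0] at hs
  exact ⟨by simpa using hs.1, hs.2.1, fun m hm => hs.2.2 m (by omega) hm⟩

theorem pv_drop_drop_eq (s : List Char) (a b : Nat) (hab : a ≤ b) :
    (s.drop a).drop (b - a) = s.drop b := by
  rw [List.drop_drop]
  congr 1
  omega

theorem pv_step_eq (var : String) (j : Int) (hj : 0 ≤ j) :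
    PySem.Str.find (PySem.Str.slice var (some (j + 1)) none) "}"
      = PySem.Chars.find (var.toList.drop (j.toNat + 1)) ['}'] := by
  rw [PySem.Str.find_eq, PySem.Str.toList_slice]
  have : j + 1 = ((j.toNat + 1 : Nat) : Int) := by omega
  rw [this]
  rw [show PySem.Chars.slice var.toList (some ((j.toNat + 1 : Nat) : Int)) none
        = PySem.List.slice var.toList (some ((j.toNat + 1 : Nat) : Int)) none from rfl,
      PySem.List.slice_from_natCast]
  rfl

-- the exact value of A's while-loop, phrased through f := find (l.drop (iN+1)) '}'
theorem pv_loop_spec (var : String) (iN : Nat)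
    (hbr : ¬ ['}'] <+: var.toList.drop iN) (jN : Nat) (hji : jN < iN) :
    (PySem.Chars.find (var.toList.drop (iN + 1)) ['}'] = -1 →
      find_bracket_loop var (iN : Int) (jN : Int) = (jN : Int) ∨
      (∃ rN : Nat, rN < iN ∧ find_bracket_loop var (iN : Int) (jN : Int) = (rN : Int))) ∧
    (PySem.Chars.find (var.toList.drop (iN + 1)) ['}'] ≠ -1 →
      find_bracket_loop var (iN : Int) (jN : Int)
        = ((iN : Int) + 1) + PySem.Chars.find (var.toList.drop (iN + 1)) ['}']) := by
  induction hd : iN - jN using Nat.strong_induction_on generalizing jN with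
  | _ d IH =>
  subst hd
  set l := var.toList with hl
  rw [find_bracket_loop]
  rw [dif_pos (by exact_mod_cast hji)]
  have hstep := pv_step_eq var (jN : Int) (by omega)
  simp only [Int.toNat_natCast] at hstep
  set g := PySem.Chars.find (l.drop (jN + 1)) ['}'] with hg
  rw [hstep]
  by_cases hgk : g = -1
  · rw [dif_pos hgk]
    have hf : PySem.Chars.find (l.drop (iN + 1)) ['}'] = -1 := by
      rw [PySem.Chars.find_eq_neg_one_iff]
      rw [PySem.Chars.find_eq_neg_one_iff] at hgk
      intro hinf
      exact hgk (hinf.trans (by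
        rw [← pv_drop_drop_eq l (jN + 1) (iN + 1) (by omega)]
        exact (List.drop_suffix _ _).isInfix))
    exact ⟨fun _ => Or.inl rfl, fun h => absurd hf h⟩
  · rw [dif_neg hgk]
    obtain ⟨hg0, hgpre, hgmin⟩ := pv_find_spec (l.drop (jN + 1)) ['}'] hgk
    set gN := g.toNat with hgN
    have hgcast : g = (gN : Int) := by omega
    set pN := jN + 1 + gN with hpN
    have hppre : ['}'] <+: l.drop pN := by
      rw [List.drop_drop] at hgpre
      exact hgpre
    have hpmin : ∀ m, jN + 1 ≤ m → m < pN → ¬ ['}'] <+: l.drop m := by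
      intro m hm1 hm2 hc
      refine hgmin (m - (jN + 1)) (by omega) ?_
      rw [pv_drop_drop_eq l (jN + 1) m (by omega)]
      exact hc
    have hpne : pN ≠ iN := fun h => hbr (h ▸ hppre)
    have hpcast : g + ((jN : Int) + 1) = (pN : Int) := by omega
    by_cases hip : (iN : Int) < g + ((jN : Int) + 1)
    · rw [if_pos hip]
      have hipN : iN < pN := by omega
      have hf : PySem.Chars.find (l.drop (iN + 1)) ['}'] = ((pN - (iN + 1) : Nat) : Int) := by
        refine pv_find_eq _ _ _ ?_ ?_
        · rw [pv_drop_drop_eq l (iN + 1) pN (by omega)]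
          exact hppre
        · intro m hm hc
          rw [List.drop_drop] at hc
          exact hpmin (iN + 1 + m) (by omega) (by omega) hc
      refine ⟨fun h => absurd hf (by rw [h]; intro hx; omega), fun _ => ?_⟩
      rw [hf, hpcast]
      omega
    · rw [if_neg hip]
      have hipN : pN < iN := by omega
      have := IH (iN - pN) (by omega) pN hipN rfl
      rw [hpcast]
      refine ⟨fun h => ?_, fun h => (this.2 h)⟩
      rcases this.1 h with h1 | ⟨rN, hr1, hr2⟩
      · exact Or.inr ⟨pN, hipN, h1⟩
      · exact Or.inr ⟨rN, hr1, hr2⟩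

-- A's 9-way string scan equals a char-level any over pvBadChars
theorem pv_badchars (bracket : String) :
    (([".", "#", "!", "%", "*", "@", "&", "(", ")"] : List String).any
      (fun x => PySem.Str.isIn x bracket))
    = (bracket.toList.any (fun c => pvBadChars.contains c)) := by
  rw [Bool.eq_iff_iff]
  simp only [List.any_cons, List.any_nil, Bool.or_eq_true, Bool.false_eq_true, or_false,
    PySem.Str.isIn_eq, PySem.Chars.isIn_iff_infix, List.singleton_infix_iff,
    List.any_eq_true, List.contains_eq_mem, decide_eq_true_eq,
    show (".":String).toList = ['.'] from rfl, show ("#":String).toList = ['#'] from rfl,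
    show ("!":String).toList = ['!'] from rfl, show ("%":String).toList = ['%'] from rfl,
    show ("*":String).toList = ['*'] from rfl, show ("@":String).toList = ['@'] from rfl,
    show ("&":String).toList = ['&'] from rfl, show ("(":String).toList = ['('] from rfl,
    show (")":String).toList = [')'] from rfl,
    show pvBadChars = ['.','#','!','%','*','@','&','(',')'] from rfl,
    List.mem_cons, List.not_mem_nil, or_false]
  constructor
  · rintro (h|h|h|h|h|h|h|h|h) <;> exact ⟨_, h, by simp⟩
  · rintro ⟨c, hc, hmem⟩
    rcases hmem with h|h|h|h|h|h|h|h|h <;> subst h <;> tauto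

-- ===== B-side characterisation =====

-- inside the bracket, no '}' ahead: the loop falls off the end
theorem hbs_check_none (s : List Char) (hns : ¬ ['}'] <:+: s) :
    ∀ bad empty p, hbs_loop s true bad empty p = false := by
  induction s with
  | nil => intro bad empty p; rfl
  | cons c r IH =>
    intro bad empty p
    have hc : c ≠ '}' := by
      intro h
      exact hns (h ▸ (List.infix_cons_iff.mpr (Or.inl ⟨r, rfl⟩)))
    rw [hbs_loop, if_pos rfl, if_neg hc]
    exact IH (fun h => hns (h.trans (List.suffix_cons c r).isInfix)) _ _ _

-- inside the bracket, first '}' at index k: the exact value returned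
theorem hbs_check_some (k : Nat) : ∀ (s : List Char) (bad empty p : Bool),
    ['}'] <+: s.drop k → (∀ m, m < k → ¬ ['}'] <+: s.drop m) →
    hbs_loop s true bad empty p
      = (bad || (s.take k).any (fun c => pvBadChars.contains c) || (empty && decide (k = 0))) := by
  induction k with
  | zero =>
    intro s bad empty p h1 _
    obtain ⟨u, hu⟩ := h1
    simp only [List.drop_zero] at hu
    subst hu
    simp only [List.cons_append, List.nil_append]
    rw [hbs_loop, if_pos rfl, if_pos rfl]
    simp
  | succ k IH =>
    intro s bad empty p h1 h2
    match s with
    | [] => simp at h1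
    | c :: r =>
      have hc : c ≠ '}' := by
        intro h
        exact h2 0 (Nat.succ_pos k) (by subst h; exact ⟨r, rfl⟩)
      rw [hbs_loop, if_pos rfl, if_neg hc]
      rw [IH r _ false p (by simpa using h1) (fun m hm => by
        have := h2 (m + 1) (by omega)
        simpa using this)]
      simp only [List.take_succ_cons, List.any_cons, Nat.succ_ne_zero]
      cases hcc : pvBadChars.contains c <;> cases bad <;> simp

-- before the bracket: no '${' anywhere means the loop never enters and returns False
theorem hbs_scan_none : ∀ (s : List Char) (p : Bool),
    ¬ ['$','{'] <:+: s → (p = true → s.head? ≠ some '{') →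
    hbs_loop s false false true p = false := by
  intro s
  induction s with
  | nil => intro p _ _; rfl
  | cons c r IH =>
    intro p hni hp
    have hcond : (p && (c == '{')) = false := by
      cases p with
      | false => rfl
      | true =>
        have := hp rfl
        simp only [List.head?_cons, ne_eq, Option.some.injEq] at this
        simp [this]
    rw [hbs_loop]
    rw [if_neg (by simp)]
    rw [hcond]
    simp only [Bool.false_eq_true, if_false]
    refine IH (c == '$') (fun h => hni (h.trans (List.suffix_cons c r).isInfix)) ?_
    intro hcd hh
    have hc : c = '$' := by simpa using hcd
    cases r with
    | nil => simp at hh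
    | cons c0 r' =>
      have hc0 : c0 = '{' := by simpa using hh
      subst hc; subst hc0
      exact hni (show ['$','{'] <+: '$' :: '{' :: r' from ⟨r', rfl⟩).isInfix

-- before the bracket: first '${' at index iN hands control to the inside phase
theorem hbs_scan_main (iN : Nat) : ∀ (s : List Char) (p : Bool),
    ['$','{'] <+: s.drop iN → (∀ m, m < iN → ¬ ['$','{'] <+: s.drop m) →
    (p = true → s.head? ≠ some '{') →
    hbs_loop s false false true p = hbs_loop (s.drop (iN + 2)) true false true true := by
  induction iN with
  | zero =>
    intro s p h1 _ _
    obtain ⟨u, hu⟩ := h1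
    simp only [List.drop_zero] at hu
    subst hu
    simp only [List.cons_append, List.nil_append]
    rw [hbs_loop]
    rw [if_neg (by simp)]
    rw [show (p && ('$' == '{')) = false by simp]
    rw [if_neg (by simp)]
    rw [hbs_loop]
    rw [if_neg (by simp)]
    rw [if_pos (by decide)]
    simp
  | succ iN IH =>
    intro s p h1 h2 hp
    match s with
    | [] => simp at h1
    | c :: r =>
      have hcond : (p && (c == '{')) = false := by
        cases p with
        | false => rfl
        | true =>
          have := hp rfl
          simp only [List.head?_cons, ne_eq, Option.some.injEq] at this
          simp [this]
      rw [hbs_loop]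
      rw [if_neg (by simp)]
      rw [hcond]
      simp only [Bool.false_eq_true, if_false]
      rw [show (c :: r).drop (iN + 1 + 2) = r.drop (iN + 2) from rfl]
      refine IH r (c == '$') (by simpa using h1) (fun m hm => by
        have := h2 (m + 1) (by omega)
        simpa using this) ?_
      intro hcd hh
      have hc : c = '$' := by simpa using hcd
      cases r with
      | nil => simp at hh
      | cons c0 r' =>
        have hc0 : c0 = '{' := by simpa using hh
        refine h2 0 (Nat.succ_pos _) ?_
        subst hc; subst hc0
        exact ⟨r', rfl⟩

-- ===== VERDICT =====
theorem has_bad_substitution_spec : Claim_equal_has_bad_substitution := by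
  unfold Claim_equal_has_bad_substitution Spec_has_bad_substitution
  intro var _
  set l := var.toList with hl
  have halt : has_bad_substitution_alt var = hbs_loop l false false true false := rfl
  have hfindi : PySem.Str.find var "${" = PySem.Chars.find l ['$','{'] := by
    rw [PySem.Str.find_eq]; rfl
  by_cases hi : PySem.Str.find var "${" = -1
  · -- no '${' anywhere: A's except-path False, B's scan falls off the end
    have hi' : ¬ ['$','{'] <:+: l := by
      rw [← PySem.Chars.find_eq_neg_one_iff, ← hfindi]; exact hi
    have hi2 : PySem.Chars.find var.toList ['$','{'] = -1 := by rw [← hfindi]; exact hi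
    have hA : has_bad_substitution var = false := by
      simp [has_bad_substitution, find_bracket, hi2]
    rw [hA, halt, hbs_scan_none l false hi' (by simp)]
  · obtain ⟨hi0, hipre, himin⟩ := pv_find_spec l ['$','{'] (by rw [← hfindi]; exact hi)
    rw [← hfindi] at hi0 hipre himin
    set iI := PySem.Str.find var "${" with hiI
    set iN := iI.toNat with hiN
    have hicast : iI = (iN : Int) := by omega
    obtain ⟨t, ht⟩ := hipre
    have hdrop0 : l.drop iN = '$' :: '{' :: t := by rw [← ht]; rfl
    have hdrop1 : l.drop (iN + 1) = '{' :: t := by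
      have h := pv_drop_drop_eq l iN (iN + 1) (by omega)
      rw [show iN + 1 - iN = 1 by omega, hdrop0] at h
      rw [← h]
      rfl
    have hdrop2 : l.drop (iN + 2) = t := by
      have h := pv_drop_drop_eq l iN (iN + 2) (by omega)
      rw [show iN + 2 - iN = 2 by omega, hdrop0] at h
      rw [← h]
      rfl
    have hbri : ¬ ['}'] <+: l.drop iN := by
      rintro ⟨u, hu⟩
      rw [hdrop0] at hu
      simp at hu
    -- B's scan phase hands control to the inside phase over t
    have hBmain : hbs_loop l false false true false = hbs_loop t true false true true := by
      rw [hbs_scan_main iN l false ⟨t, ht⟩ (fun m hm => himin m hm) (by simp), hdrop2]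
    -- A's first global '}' find
    set j0 := PySem.Str.find var "}" with hj0I
    have hfindj : j0 = PySem.Chars.find l ['}'] := by rw [hj0I, PySem.Str.find_eq]; rfl
    by_cases hfe' : PySem.Chars.find t ['}'] = -1
    · -- no '}' after the '${': B falls off the end; A either raises or gets an empty bracket
      have hnt : ¬ ['}'] <:+: t := by rw [← PySem.Chars.find_eq_neg_one_iff]; exact hfe'
      have hB : hbs_loop l false false true false = false := by
        rw [hBmain, hbs_check_none t hnt]
      by_cases hj0 : j0 = -1
      · have hA : has_bad_substitution var = false := by
          simp only [has_bad_substitution, find_bracket, ← hiI, ← hj0I, if_neg hi, if_pos hj0]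
        rw [hA, halt, hB]
      · obtain ⟨hj00, hjpre, hjmin⟩ := pv_find_spec l ['}'] (by rw [← hfindj]; exact hj0)
        rw [← hfindj] at hj00 hjpre hjmin
        set j0N := j0.toNat with hj0N
        have hjcast : j0 = (j0N : Int) := by omega
        -- every '}' is strictly before the '${'
        have hji : j0N < iN := by
          by_contra hge
          push_neg at hge
          rcases Nat.lt_or_ge j0N (iN + 2) with hlt | hge2
          · have hor : j0N = iN ∨ j0N = iN + 1 := by omega
            rcases hor with h | h
            · exact hbri (h ▸ hjpre)
            · rw [h, hdrop1] at hjpre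
              obtain ⟨u, hu⟩ := hjpre
              simp at hu
          · refine hnt ?_
            have h := pv_drop_drop_eq l (iN + 2) j0N (by omega)
            rw [hdrop2] at h
            rw [← h] at hjpre
            exact hjpre.isInfix.trans (List.drop_suffix _ _).isInfix
        have hfe : PySem.Chars.find (l.drop (iN + 1)) ['}'] = -1 := by
          rw [PySem.Chars.find_eq_neg_one_iff, hdrop1]
          intro hinf
          rw [List.singleton_infix_iff, List.mem_cons] at hinf
          rcases hinf with h | h
          · exact absurd h (by decide)
          · exact hnt (by rw [List.singleton_infix_iff]; exact h)
        have hloop := pv_loop_spec var iN hbri j0N hji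
        have hAcall : find_bracket_loop var iI j0 = find_bracket_loop var (iN : Int) (j0N : Int) := by
          rw [hicast, hjcast]
        have hrlt : ∃ rN : Nat, rN < iN ∧ find_bracket_loop var iI j0 = (rN : Int) := by
          rcases hloop.1 hfe with h1 | h1
          · exact ⟨j0N, hji, by rw [hAcall, h1]⟩
          · rcases h1 with ⟨rN, h2, h3⟩; exact ⟨rN, h2, by rw [hAcall, h3]⟩
        obtain ⟨rN, hrlt, hr⟩ := hrlt
        have hempty : (PySem.Str.slice var (some iI)
            (some (find_bracket_loop var iI j0 + 1))).toList = [] := by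
          rw [hr, PySem.Str.toList_slice]
          rw [show PySem.Chars.slice l (some iI) (some ((rN : Int) + 1))
                = PySem.List.slice l (some iI) (some ((rN : Int) + 1)) from rfl]
          rw [PySem.List.slice_toNat (xs := l) (a := iI) (b := (rN : Int) + 1)
            (by omega) (by omega)]
          rw [show ((rN : Int) + 1).toNat - iI.toNat = 0 by omega]
          simp
        have hA : has_bad_substitution var = false := by
          simp only [has_bad_substitution, find_bracket, ← hiI, ← hj0I, if_neg hi, if_neg hj0]
          rw [pv_badchars, hempty]
          simp only [List.any_nil, Bool.false_eq_true, if_false]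
          rw [if_neg (by rw [hr]; intro h; omega)]
        rw [hA, halt, hB]
    · -- a '}' closes the bracket: first one after '${' is at J = iN + 2 + k'
      obtain ⟨hf0, hfpre, hfmin⟩ := pv_find_spec t ['}'] hfe'
      set k' := (PySem.Chars.find t ['}']).toNat with hk'
      -- B's inside phase value
      have hB : hbs_loop l false false true false
          = ((t.take k').any (fun c => pvBadChars.contains c) || decide (k' = 0)) := by
        rw [hBmain, hbs_check_some k' t false true true hfpre hfmin]
        simp
      -- the character at position k' of t is '}'
      have hgetk : t[k']? = some '}' := by
        obtain ⟨u, hu⟩ := hfpre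
        have : (t.drop k')[0]? = some '}' := by rw [← hu]; rfl
        rwa [List.getElem?_drop, Nat.add_zero] at this
      -- f over l.drop (iN+1) = k' + 1
      have hf : PySem.Chars.find (l.drop (iN + 1)) ['}'] = ((k' + 1 : Nat) : Int) := by
        refine pv_find_eq _ _ _ ?_ ?_
        · rw [hdrop1, List.drop_succ_cons]
          exact hfpre
        · intro m hm
          rw [hdrop1]
          match m with
          | 0 =>
            rintro ⟨u, hu⟩
            simp at hu
          | m' + 1 =>
            rw [List.drop_succ_cons]
            exact hfmin m' (by omega)
      -- the global first '}' exists
      have hj0 : j0 ≠ -1 := by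
        rw [hfindj, PySem.Chars.find_ne_neg_one_iff, List.singleton_infix_iff]
        have hmem : '}' ∈ t := List.mem_of_getElem? hgetk
        have hmem2 : '}' ∈ l.drop (iN + 2) := by rw [hdrop2]; exact hmem
        exact (List.drop_suffix _ _).sublist.subset hmem2
      obtain ⟨hj00, hjpre, hjmin⟩ := pv_find_spec l ['}'] (by rw [← hfindj]; exact hj0)
      rw [← hfindj] at hj00 hjpre hjmin
      set j0N := j0.toNat with hj0N
      have hjcast : j0 = (j0N : Int) := by omega
      have hJpre : ['}'] <+: l.drop (iN + 2 + k') := by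
        have h := pv_drop_drop_eq l (iN + 2) (iN + 2 + k') (by omega)
        rw [hdrop2, show iN + 2 + k' - (iN + 2) = k' by omega] at h
        rw [← h]
        exact hfpre
      -- A's while-loop lands exactly on J = i + 2 + k'
      have hloopres : find_bracket_loop var iI j0 = iI + 2 + (k' : Int) := by
        by_cases hji : j0N < iN
        · have hloop := pv_loop_spec var iN hbri j0N hji
          have hAcall : find_bracket_loop var iI j0
              = find_bracket_loop var (iN : Int) (j0N : Int) := by
            rw [hicast, hjcast]
          rw [hAcall, hloop.2 (by
            rw [hf]
            intro h
            have h2 := Int.natCast_nonneg (k' + 1)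
            linarith), hf]
          rw [hicast]
          push_cast
          ring
        · push_neg at hji
          have hnr : find_bracket_loop var iI j0 = j0 := by
            rw [find_bracket_loop, dif_neg (by omega)]
          have hj0le : j0N ≤ iN + 2 + k' := by
            by_contra hgt
            push_neg at hgt
            exact hjmin _ hgt hJpre
          have hne0 : j0N ≠ iN := fun h => hbri (h ▸ hjpre)
          have hne1 : j0N ≠ iN + 1 := by
            intro h
            rw [h, hdrop1] at hjpre
            obtain ⟨u, hu⟩ := hjpre
            simp at hu
          have hj0eq : j0N = iN + 2 + k' := by
            by_contra hne
            have hlt : j0N - (iN + 2) < k' := by omega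
            refine hfmin (j0N - (iN + 2)) hlt ?_
            have h := pv_drop_drop_eq l (iN + 2) j0N (by omega)
            rw [hdrop2] at h
            rw [h]
            exact hjpre
          rw [hnr, hjcast, hj0eq]
          rw [hicast]
          push_cast
          ring
      -- bracket = "${" ++ body ++ "}"
      have htake : t.take (k' + 1) = t.take k' ++ ['}'] := by
        rw [List.take_succ, hgetk]
        rfl
      have hbrt : (PySem.Str.slice var (some iI) (some (iI + 2 + (k' : Int) + 1))).toList
          = '$' :: '{' :: (t.take k' ++ ['}']) := by
        rw [PySem.Str.toList_slice]
        rw [show PySem.Chars.slice l (some iI) (some (iI + 2 + (k' : Int) + 1))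
              = PySem.List.slice l (some iI) (some (iI + 2 + (k' : Int) + 1)) from rfl]
        rw [PySem.List.slice_toNat (xs := l) (a := iI) (b := iI + 2 + (k' : Int) + 1)
          (by omega) (by omega)]
        rw [show (iI + 2 + (k' : Int) + 1).toNat - iI.toNat = k' + 3 by omega]
        rw [show iI.toNat = iN from rfl, hdrop0]
        rw [show k' + 3 = (k' + 1) + 1 + 1 by ring]
        rw [List.take_succ_cons, List.take_succ_cons, htake]
      simp only [has_bad_substitution, find_bracket, ← hiI, ← hj0I, if_neg hi, if_neg hj0]
      rw [hloopres, pv_badchars, hbrt, halt, hB]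
      simp only [List.any_cons, List.any_append, List.any_nil,
        show pvBadChars.contains '$' = false from rfl,
        show pvBadChars.contains '{' = false from rfl,
        show pvBadChars.contains '}' = false from rfl,
        Bool.false_or, Bool.or_false]
      by_cases hany : ((t.take k').any (fun c => pvBadChars.contains c)) = true
      · rw [if_pos hany, hany]
        simp
      · rw [if_neg hany]
        simp only [Bool.not_eq_true] at hany
        rw [hany, Bool.false_or]
        by_cases hk0 : k' = 0
        · rw [hk0]
          simp
        · have hcond : ¬ (iI + 2 + (k' : Int) = iI + 2) := by
            intro h
            have h2 : (k' : Int) = 0 := by linarith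
            exact hk0 (by exact_mod_cast h2)
          rw [if_neg hcond, decide_eq_false hk0]
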